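-- pv_equiv track=rewrite | github.com/AlexGoncalves21/agentsday-hackathon | agents/organizer/second_brain_agent/compiler.py | _extract_social_post_text
-- ===== SOURCE A (Python) =====
-- def _extract_social_post_text(information: str) -> str:
--     lines = information.splitlines()
--     for index, line in enumerate(lines):
--         if line.strip().lower() != "post text:":
--             continue
--         for candidate in lines[index + 1 :]:
--             stripped = candidate.strip()
--             if not stripped:
--                 continue
--             if stripped.lower().startswith("linked or media urls:"):
--                 return ""
--             return stripped
--     return ""
-- ===== SOURCE B (Python) =====
-- def _extract_social_post_text(information: str) -> str:
--     found_marker = False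
--     for line in information.splitlines():
--         if not found_marker:
--             if line.strip().lower() == "post text:":
--                 found_marker = True
--             continue
--         stripped = line.strip()
--         if not stripped:
--             continue
--         if stripped.lower().startswith("linked or media urls:"):
--             return ""
--         return stripped
--     return ""
-- ===== Notes on version B (the rewrite author's own statement) =====
-- stated objective: simpler
-- what changed: Replaces A's nested structure (outer enumerate scan for the marker plus an inner scan over a fresh slice lines[index+1:]) by one linear pass over the lines with a found_marker boolean flag, with no slicing and no nested loop.
import Mathlib
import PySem

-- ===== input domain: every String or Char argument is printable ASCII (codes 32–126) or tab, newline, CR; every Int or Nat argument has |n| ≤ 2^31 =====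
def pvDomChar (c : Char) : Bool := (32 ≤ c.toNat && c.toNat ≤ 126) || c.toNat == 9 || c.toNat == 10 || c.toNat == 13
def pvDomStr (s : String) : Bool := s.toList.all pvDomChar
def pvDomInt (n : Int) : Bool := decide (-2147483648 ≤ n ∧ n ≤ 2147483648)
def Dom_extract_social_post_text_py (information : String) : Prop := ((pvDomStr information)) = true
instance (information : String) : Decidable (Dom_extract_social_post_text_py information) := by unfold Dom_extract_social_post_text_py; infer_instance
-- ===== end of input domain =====

-- B replaces A's nested marker-then-scan loops by one linear pass with a found_marker flag (same returned value; objective: simpler).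

-- ===== PORT A =====
-- inner 'for candidate in lines[index+1:]' loop: some r = the loop returns r, none = loop falls through
def pvInnerA : List String → Option String
  | [] => none
  | candidate :: rest =>
    let stripped := PySem.Str.strip candidate
    if stripped = "" then pvInnerA rest
    else if PySem.Str.startswith (PySem.Str.lower stripped) "linked or media urls:" then some ""
    else some stripped

-- outer 'for index, line in enumerate(lines)' loop over the enumerate list
def pvOuterA (lines : List String) : List (Int × String) → String
  | [] => ""
  | (index, line) :: rest =>
    if PySem.Str.lower (PySem.Str.strip line) ≠ "post text:" then pvOuterA lines rest
    else
      match pvInnerA (PySem.List.slice lines (some (index + 1)) none) with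
      | some r => r
      | none => pvOuterA lines rest

def extract_social_post_text_py (information : String) : String :=
  let lines := PySem.Str.splitlines information
  pvOuterA lines (PySem.List.enumerate lines 0)

-- ===== PORT B =====
-- single pass with the found_marker flag
def pvScanB : List String → Bool → String
  | [], _ => ""
  | line :: rest, false =>
    if PySem.Str.lower (PySem.Str.strip line) = "post text:" then pvScanB rest true
    else pvScanB rest false
  | line :: rest, true =>
    let stripped := PySem.Str.strip line
    if stripped = "" then pvScanB rest true
    else if PySem.Str.startswith (PySem.Str.lower stripped) "linked or media urls:" then ""
    else stripped

def extract_social_post_text_py_alt (information : String) : String :=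
  pvScanB (PySem.Str.splitlines information) false

-- ===== PRECONDITION & SPEC =====
def Spec_extract_social_post_text_py (information : String) (out : String) : Prop := out = extract_social_post_text_py_alt information
instance (information : String) (out : String) : Decidable (Spec_extract_social_post_text_py information out) := by unfold Spec_extract_social_post_text_py; infer_instance

-- ===== CLAIM (what is proved, stated in full; the proofs are below) =====
def Claim_equal_extract_social_post_text_py : Prop := ∀ (information : String), Dom_extract_social_post_text_py information → Spec_extract_social_post_text_py information (extract_social_post_text_py information)

-- ===== LEMMAS AND PROOFS =====

-- after the marker, B's flag-true scan is exactly A's inner loop (with "" when it falls through)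
lemma scanB_true_eq_inner (xs : List String) :
    pvScanB xs true = (pvInnerA xs).getD "" := by
  induction xs with
  | nil => rfl
  | cons x rest ih =>
    simp only [pvScanB, pvInnerA]
    by_cases h1 : PySem.Str.strip x = ""
    · simp [h1, ih]
    · simp only [if_neg h1]
      split_ifs <;> simp

-- if A's inner loop falls through, every remaining line strips to "", so the rest of A's outer loop finds no marker
lemma outerA_of_inner_none (lines xs : List String) (n : Int)
    (h : pvInnerA xs = none) : pvOuterA lines (PySem.List.enumerate xs n) = "" := by
  induction xs generalizing n with
  | nil => rfl
  | cons x rest ih =>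
    by_cases hx : PySem.Str.strip x = ""
    · rw [PySem.List.enumerate_cons]
      simp only [pvOuterA, hx]
      rw [if_pos (by decide)]
      apply ih
      simpa [pvInnerA, hx] using h
    · exfalso
      simp only [pvInnerA] at h
      rw [if_neg hx] at h
      split_ifs at h

-- main invariant: the outer loop started at offset n, with suf = lines.drop n, equals B's flag-false scan of suf
lemma outerA_eq_scanB (lines : List String) : ∀ (n : Nat) (suf : List String),
    suf = lines.drop n → pvOuterA lines (PySem.List.enumerate suf (n : Int)) = pvScanB suf false := by
  intro n suf
  induction suf generalizing n with
  | nil => intro _; rfl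
  | cons line rest ih =>
    intro hdrop
    have hrest : rest = lines.drop (n + 1) := by
      have := congrArg List.tail hdrop
      simpa [List.tail_drop] using this
    have hcast : ((n : Int) + 1) = ((n + 1 : Nat) : Int) := by push_cast; ring
    rw [PySem.List.enumerate_cons]
    simp only [pvOuterA, pvScanB]
    by_cases hm : PySem.Str.lower (PySem.Str.strip line) = "post text:"
    · rw [if_neg (not_not_intro hm), if_pos hm]
      have hslice : PySem.List.slice lines (some ((n : Int) + 1)) none = rest := by
        rw [hcast, PySem.List.slice_from_natCast, ← hrest]
      rw [hslice, scanB_true_eq_inner]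
      cases h : pvInnerA rest with
      | some r => simp
      | none =>
        simp only [Option.getD_none]
        exact outerA_of_inner_none lines rest _ h
    · rw [if_pos hm, if_neg hm, hcast]
      exact ih (n + 1) hrest

-- ===== VERDICT (by name: the statement is the Claim_ definition above) =====
theorem extract_social_post_text_py_spec : Claim_equal_extract_social_post_text_py := by
  intro information _
  unfold Spec_extract_social_post_text_py extract_social_post_text_py extract_social_post_text_py_alt
  exact outerA_eq_scanB _ 0 _ (by simp)
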